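-- pv_equiv track=rewrite | github.com/docwza/deep-rl-tsc | TrafficSignalController.py | get_transitions
-- ===== SOURCE A (Python) =====
-- def get_transitions(current_phase, next_phase):
--     ###arguments must be same length
--     y = None
--     r = None
--     for c, n in zip(current_phase, next_phase):
--         if c == 'g' and n == 'G':
--             ##advance turn, only need yellow
--             ###add yellow only
--             ###G - > r becomes y, else leave alone
--             y = ''.join([ 'y' if C == 'G' and N == 'r' else C for C, N in zip(current_phase, next_phase) ])
--             return [y]
--
--     for c, n in zip(current_phase, next_phase):
--         if ( c == 'g' and n == 'r' ) or ( c == 'G' and n == 'r' ):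
--             ##protected change, need all red stop
--             ###red and yellow
--             y = ''.join([ 'y'  if ( C == 'g' and N == 'r' ) or ( C == 'G' and N == 'r' ) else C for C, N in zip(current_phase, next_phase) ])
--             ###all red
--             r = 'r'*len(current_phase)
--             return [y,r]
--
--     return []
-- ===== SOURCE B (Python) =====
-- def get_transitions(current_phase, next_phase):
--     has_advance = False
--     has_protected = False
--     y_adv = []
--     y_prot = []
--     for c, n in zip(current_phase, next_phase):
--         if c == 'g' and n == 'G':
--             has_advance = True
--         if (c == 'g' or c == 'G') and n == 'r':
--             has_protected = True
--         y_adv.append('y' if c == 'G' and n == 'r' else c)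
--         y_prot.append('y' if (c == 'g' or c == 'G') and n == 'r' else c)
--     if has_advance:
--         return [''.join(y_adv)]
--     if has_protected:
--         return [''.join(y_prot), 'r' * len(current_phase)]
--     return []
-- ===== Notes on version B (the rewrite author's own statement) =====
-- stated objective: alternative
-- what changed: Replaces A's two detection scans each followed by a full rebuild-comprehension over the zip (up to four traversals) with a single pass that accumulates the two candidate yellow strings and two flags, then dispatches after the loop.
import Mathlib
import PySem

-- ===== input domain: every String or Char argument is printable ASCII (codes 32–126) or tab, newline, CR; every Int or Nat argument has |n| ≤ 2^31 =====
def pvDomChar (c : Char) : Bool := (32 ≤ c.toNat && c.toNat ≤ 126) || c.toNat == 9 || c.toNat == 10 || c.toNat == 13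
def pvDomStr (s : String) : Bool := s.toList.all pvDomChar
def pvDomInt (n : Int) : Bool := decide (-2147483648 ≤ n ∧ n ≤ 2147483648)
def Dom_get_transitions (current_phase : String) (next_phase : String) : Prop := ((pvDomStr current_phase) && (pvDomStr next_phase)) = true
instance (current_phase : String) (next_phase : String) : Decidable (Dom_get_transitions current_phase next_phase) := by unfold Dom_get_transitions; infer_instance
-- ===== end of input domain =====

-- B fuses A's two detection scans and their rebuild comprehensions into one accumulating pass; same values everywhere (alternative decomposition, not claimed faster).

-- ===== PORT A =====
-- the comprehension of A's first early return: 'y' if C=='G' and N=='r' else C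
def pvBuildAdv (zs : List (Char × Char)) : List Char :=
  zs.map (fun p => if p.1 == 'G' && p.2 == 'r' then 'y' else p.1)

-- the comprehension of A's second early return
def pvBuildProt (zs : List (Char × Char)) : List Char :=
  zs.map (fun p => if (p.1 == 'g' && p.2 == 'r') || (p.1 == 'G' && p.2 == 'r') then 'y' else p.1)

-- A's second for-loop (early return on first protected change, else fall through to [])
def pvLoop2 (full : List (Char × Char)) (lenC : Nat) : List (Char × Char) → List String
  | [] => []
  | p :: rest =>
    if (p.1 == 'g' && p.2 == 'r') || (p.1 == 'G' && p.2 == 'r') then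
      [String.ofList (pvBuildProt full), String.ofList (List.replicate lenC 'r')]
    else pvLoop2 full lenC rest

-- A's first for-loop (early return on first advance turn, else run the second loop)
def pvLoop1 (full : List (Char × Char)) (lenC : Nat) : List (Char × Char) → List String
  | [] => pvLoop2 full lenC full
  | p :: rest =>
    if p.1 == 'g' && p.2 == 'G' then [String.ofList (pvBuildAdv full)]
    else pvLoop1 full lenC rest

def get_transitions (current_phase : String) (next_phase : String) : List String :=
  let zs := current_phase.toList.zip next_phase.toList
  pvLoop1 zs current_phase.toList.length zs

-- ===== PORT B =====
-- one step of B's single loop: two flags and the two accumulated yellow strings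
def pvStep (s : Bool × Bool × List Char × List Char) (p : Char × Char) :
    Bool × Bool × List Char × List Char :=
  (s.1 || (p.1 == 'g' && p.2 == 'G'),
   s.2.1 || ((p.1 == 'g' || p.1 == 'G') && p.2 == 'r'),
   s.2.2.1 ++ [if p.1 == 'G' && p.2 == 'r' then 'y' else p.1],
   s.2.2.2 ++ [if (p.1 == 'g' || p.1 == 'G') && p.2 == 'r' then 'y' else p.1])

def get_transitions_alt (current_phase : String) (next_phase : String) : List String :=
  let zs := current_phase.toList.zip next_phase.toList
  let st := zs.foldl pvStep (false, false, [], [])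
  if st.1 then [String.ofList st.2.2.1]
  else if st.2.1 then [String.ofList st.2.2.2, String.ofList (List.replicate current_phase.toList.length 'r')]
  else []

-- ===== PRECONDITION & SPEC =====
def Spec_get_transitions (current_phase : String) (next_phase : String) (out : List String) : Prop := out = get_transitions_alt current_phase next_phase
instance (current_phase : String) (next_phase : String) (out : List String) : Decidable (Spec_get_transitions current_phase next_phase out) := by unfold Spec_get_transitions; infer_instance

-- ===== CLAIM (what is proved, stated in full; the proofs are below) =====
def Claim_equal_get_transitions : Prop := ∀ (current_phase : String) (next_phase : String), Dom_get_transitions current_phase next_phase → Spec_get_transitions current_phase next_phase (get_transitions current_phase next_phase)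

-- ===== LEMMAS AND PROOFS =====

-- characterisation of B's fold
theorem pvFoldl_char (zs : List (Char × Char)) (a b : Bool) (ya yp : List Char) :
    zs.foldl pvStep (a, b, ya, yp) =
      (a || zs.any (fun p => p.1 == 'g' && p.2 == 'G'),
       b || zs.any (fun p => (p.1 == 'g' || p.1 == 'G') && p.2 == 'r'),
       ya ++ zs.map (fun p => if p.1 == 'G' && p.2 == 'r' then 'y' else p.1),
       yp ++ zs.map (fun p => if (p.1 == 'g' || p.1 == 'G') && p.2 == 'r' then 'y' else p.1)) := by
  induction zs generalizing a b ya yp with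
  | nil => simp
  | cons p rest ih =>
    simp only [List.foldl_cons, pvStep, ih, List.any_cons, List.map_cons]
    simp [Bool.or_assoc]

-- characterisation of A's first loop
theorem pvLoop1_char (full : List (Char × Char)) (lenC : Nat) (zs : List (Char × Char)) :
    pvLoop1 full lenC zs =
      if zs.any (fun p => p.1 == 'g' && p.2 == 'G') then [String.ofList (pvBuildAdv full)]
      else pvLoop2 full lenC full := by
  induction zs with
  | nil => simp [pvLoop1]
  | cons p rest ih =>
    simp only [pvLoop1, List.any_cons, ih]
    by_cases h : (p.1 == 'g' && p.2 == 'G') = true <;> simp [h]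

-- characterisation of A's second loop
theorem pvLoop2_char (full : List (Char × Char)) (lenC : Nat) (zs : List (Char × Char)) :
    pvLoop2 full lenC zs =
      if zs.any (fun p => (p.1 == 'g' && p.2 == 'r') || (p.1 == 'G' && p.2 == 'r')) then
        [String.ofList (pvBuildProt full), String.ofList (List.replicate lenC 'r')]
      else [] := by
  induction zs with
  | nil => simp [pvLoop2]
  | cons p rest ih =>
    simp only [pvLoop2, List.any_cons, ih]
    by_cases h : ((p.1 == 'g' && p.2 == 'r') || (p.1 == 'G' && p.2 == 'r')) = true <;> simp [h]

-- ===== VERDICT (by name: the statement is the Claim_ definition above) =====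
theorem get_transitions_spec : Claim_equal_get_transitions := by
  intro cp np _
  unfold Spec_get_transitions get_transitions get_transitions_alt
  simp only [pvFoldl_char, pvLoop1_char, pvLoop2_char, Bool.false_or, List.nil_append]
  simp [pvBuildAdv, pvBuildProt, Bool.and_or_distrib_right]
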